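-- pv_equiv track=rewrite | github.com/HahmDY/PPO-soccer-player | Functions.py | sensor_back_sig
-- ===== SOURCE A (Python) =====
-- def sensor_back_sig(data):
--     player = []
--     sensor_data = []
--     for sensor in range(9):
--         player.append(data[8 * sensor:(8 * sensor) + 8])
--
--     for stack in range(3):
--         sensor_data.append(player[3 * stack:(3 * stack) + 3])
--
--     return sensor_data
-- ===== SOURCE B (Python) =====
-- def sensor_back_sig(data):
--     return [[data[8 * (3 * stack + i):8 * (3 * stack + i) + 8] for i in range(3)]
--             for stack in range(3)]
-- ===== Notes on version B (the rewrite author's own statement) =====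
-- stated objective: simpler
-- what changed: B drops the intermediate flat 9-slice player list and builds the 3x3 nested result in one phase by slicing data directly with composed offsets.
import Mathlib
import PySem

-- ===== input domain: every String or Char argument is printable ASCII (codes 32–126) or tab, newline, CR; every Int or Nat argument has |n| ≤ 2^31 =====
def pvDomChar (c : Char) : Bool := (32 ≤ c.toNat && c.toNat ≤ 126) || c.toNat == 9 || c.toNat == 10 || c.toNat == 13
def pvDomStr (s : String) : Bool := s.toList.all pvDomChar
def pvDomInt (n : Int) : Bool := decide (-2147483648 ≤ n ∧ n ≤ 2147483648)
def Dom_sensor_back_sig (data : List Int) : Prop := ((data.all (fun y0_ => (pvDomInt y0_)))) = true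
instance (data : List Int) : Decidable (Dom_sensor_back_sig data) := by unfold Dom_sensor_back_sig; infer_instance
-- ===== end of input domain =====

-- B builds the 3x3 nested result by slicing data directly (one phase), dropping A's intermediate flat list.


-- ===== PORT A =====
-- A: two phases — slice data into 9 sensors ("player"), then group player into 3 stacks.
def sensor_back_sig (data : List Int) : List (List (List Int)) :=
  let player := (List.range 9).foldl
    (fun p sensor => p ++ [PySem.List.slice data (some (8 * (sensor : Int))) (some (8 * (sensor : Int) + 8))]) []
  let sensor_data := (List.range 3).foldl
    (fun sd stack => sd ++ [PySem.List.slice player (some (3 * (stack : Int))) (some (3 * (stack : Int) + 3))]) []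
  sensor_data

-- ===== PORT B =====
-- B: one phase — slice data directly with composed offsets, no intermediate flat list.
def sensor_back_sig_alt (data : List Int) : List (List (List Int)) :=
  (List.range 3).map (fun stack =>
    (List.range 3).map (fun i =>
      PySem.List.slice data (some (8 * (3 * (stack : Int) + (i : Int))))
        (some (8 * (3 * (stack : Int) + (i : Int)) + 8))))

-- ===== PRECONDITION & SPEC =====
def Spec_sensor_back_sig (data : List Int) (out : List (List (List Int))) : Prop := out = sensor_back_sig_alt data
instance (data : List Int) (out : List (List (List Int))) : Decidable (Spec_sensor_back_sig data out) := by unfold Spec_sensor_back_sig; infer_instance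

-- ===== CLAIM (what is proved, stated in full; the proofs are below) =====
def Claim_equal_sensor_back_sig : Prop := ∀ (data : List Int), Dom_sensor_back_sig data → Spec_sensor_back_sig data (sensor_back_sig data)

-- ===== LEMMAS AND PROOFS =====

-- ===== VERDICT (by name: the statement is the Claim_ definition above) =====
theorem sensor_back_sig_spec : Claim_equal_sensor_back_sig := by
  intro data _
  unfold Spec_sensor_back_sig sensor_back_sig sensor_back_sig_alt
  simp [List.range_succ, PySem.List.slice]
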